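-- pv_equiv track=rewrite | github.com/pypi-data/pypi-mirror-400 | packages/ebas-io/ebas_io-4.5.3.tar.gz/ebas_io-4.5.3/ebas/domain/basic_domain_logic/parameters.py | _optimise_groups
-- ===== SOURCE A (Python) =====
-- def _optimise_groups(occ):
--     """
--     Optimise the use of component names and/or group names in order to describe
--     the set of variables in the shortes possible way.
--     Parameters:
--         occ    occurance of different groups for each variable
--                list of lists of tuples (list of variables, for each variable
--                the list of possible groups and each of those is a tuple of
--                (string [name], int [count of CO in the group]).
--                The count of CO is set to 0 for comp_name (prefer comp name in
--                case where only one variables is in a group)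
--     Result:
--         list of groups/ components necessary to describe all variables (shortest
--         possible combination of comp and groups)
--     """
--     # dictionary over all descriptions (keys), each element a list:
--     #     [usable for # of variables, order number of occurances]
--     descdict = {}
--     for i in range(len(occ)):
--         for j in range(len(occ[i])):
--             if occ[i][j][0] not in descdict:
--                 descdict[occ[i][j][0]] = [1, occ[i][j][1]]
--             else:
--                 descdict[occ[i][j][0]][0] += 1
--
--     # convert to a list of tuples:
--     #     (description, usable for # of variables, order number of
--     #      occurances)
--     # and sort the list: usable for # of variables (reversed!), order number
--     # Thus, we get a list of descriptions in the order of preferred use: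
--     desclist = sorted(
--         [(key, descdict[key][0], descdict[key][1])
--          for key in descdict.keys()],
--         key=lambda x: (-x[1], x[2]))
--
--     # generate the result list: preferred description for each variable:
--     res = []
--     for i in range(len(occ)):
--         vardescs = [x[0] for x in occ[i]]
--         for desc in desclist:
--             if desc[0] in vardescs:
--                 res.append(desc[0])
--                 break
--     if len(res) != len(occ):
--         # be safe
--         raise RuntimeError()
--
--     # return a set of all used descriptions, convert to sorted list
--     return sorted(set(res))
-- ===== SOURCE B (Python) =====
-- def _optimise_groups(occ):
--     # Same statistics as A: per description, [usable-for count, first-seen order number].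
--     descdict = {}
--     for options in occ:
--         for name, num in options:
--             if name not in descdict:
--                 descdict[name] = [1, num]
--             else:
--                 descdict[name][0] += 1
--
--     # Preference order of the descriptions, then a rank index so that picking the
--     # preferred description of a variable is a single min() over its own options
--     # instead of a scan of the whole preference list.
--     ranked = sorted(descdict, key=lambda name: (-descdict[name][0], descdict[name][1]))
--     rank = {name: r for r, name in enumerate(ranked)}
--
--     used = set()
--     for options in occ:
--         # min() raises ValueError on a variable with no options (A raises RuntimeError).
--         used.add(min((name for name, _ in options), key=rank.__getitem__))
--     return sorted(used)
-- ===== Notes on version B (the rewrite author's own statement) =====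
-- stated objective: faster
-- what changed: A scans the whole sorted preference list for every variable (membership test against the variable's option names each step); B instead builds a rank index {description: position} once and picks each variable's description with a single min() over its own options, collecting picks in a set from the start.
-- outside the precondition, e.g. on _optimise_groups([[]]): A raises RuntimeError, B raises ValueError
import Mathlib
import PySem

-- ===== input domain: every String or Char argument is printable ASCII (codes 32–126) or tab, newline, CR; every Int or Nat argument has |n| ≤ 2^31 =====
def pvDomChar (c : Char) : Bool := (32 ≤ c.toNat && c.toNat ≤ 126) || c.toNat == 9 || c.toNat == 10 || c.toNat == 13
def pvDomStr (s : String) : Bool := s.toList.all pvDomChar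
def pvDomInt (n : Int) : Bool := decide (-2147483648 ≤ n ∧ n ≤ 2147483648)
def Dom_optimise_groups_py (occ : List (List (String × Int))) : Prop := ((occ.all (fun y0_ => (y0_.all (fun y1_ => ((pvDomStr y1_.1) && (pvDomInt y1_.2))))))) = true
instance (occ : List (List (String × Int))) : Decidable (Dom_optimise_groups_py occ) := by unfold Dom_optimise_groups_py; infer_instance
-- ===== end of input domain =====

-- B replaces A's per-variable scan of the whole preference list with a rank index built
-- once and a single min() over the variable's own options (measured faster by the timing
-- run); equivalence of the RETURN value is proved on inputs where A returns.

-- ===== PORT A =====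
-- Shared helper: BOTH Pythons build `descdict` with the identical loop
-- ('for name,num in the options: first time -> [1, num], else count += 1').
-- A's 'for i in range(len(occ))' / 'occ[i]' index loop is ported as the
-- structural fold over the same list in the same order (exact).
-- 'descdict[key][0] += 1' reads the present value; getD's default (0,0) is never used there.
def pvDescDict (occ : List (List (String × Int))) : PySem.Dict String (Int × Int) :=
  occ.foldl (fun d options =>
    options.foldl (fun d p =>
      if d.contains p.1 = false then d.insert p.1 (1, p.2)
      else d.insert p.1 ((d.getD p.1 (0, 0)).1 + 1, (d.getD p.1 (0, 0)).2)) d)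
    PySem.Dict.empty

def optimise_groups_py (occ : List (List (String × Int))) : List String :=
  let descdict := pvDescDict occ
  -- desclist = sorted([(key, count, order) ...], key=lambda x: (-x[1], x[2]))
  let desclist := PySem.List.sorted2 (descdict.items.map (fun kv => (kv.1, kv.2.1, kv.2.2)))
      (fun x => -x.2.1) (fun x => x.2.2)
  -- res: for each variable the first desclist entry occurring among its options
  -- ('for desc in desclist: if desc[0] in vardescs: append; break' = find?)
  let res := occ.foldl (fun res options =>
    let vardescs := options.map (·.1)
    match desclist.find? (fun d => decide (d.1 ∈ vardescs)) with
    | some d => res ++ [d.1]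
    | none => res) []
  -- 'if len(res) != len(occ): raise RuntimeError' — those inputs are excluded by Pre_
  PySem.List.sorted (PySem.Set.ofList res) (fun x => x)

-- ===== PORT B =====
def optimise_groups_py_alt (occ : List (List (String × Int))) : List String :=
  let descdict := pvDescDict occ
  -- ranked = sorted(descdict, key=lambda name: (-descdict[name][0], descdict[name][1]))
  let ranked := PySem.List.sorted2 descdict.keys
      (fun n => -(descdict.getD n (0, 0)).1) (fun n => (descdict.getD n (0, 0)).2)
  -- rank = {name: r for r, name in enumerate(ranked)}
  let rank : PySem.Dict String Int :=
    (PySem.List.enumerate ranked 0).foldl (fun d a => d.insert a.2 a.1) PySem.Dict.empty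
  -- used.add(min((name for name, _ in options), key=rank.__getitem__));
  -- min() on an empty options list raises in Python (excluded by Pre_): none branch unreachable there
  let used := occ.foldl (fun u options =>
    match PySem.List.min? (options.map (·.1)) (fun n => rank.getD n 0) with
    | some m => PySem.Set.add u m
    | none => u) PySem.Set.empty
  PySem.List.sorted used (fun x => x)

-- ===== PRECONDITION & SPEC =====
-- Pre_ excludes exactly the inputs with a variable that has an empty option list:
-- there A raises RuntimeError (and B raises ValueError).
def Pre_optimise_groups_py (occ : List (List (String × Int))) : Prop :=
  ∀ options ∈ occ, options ≠ []
instance (occ : List (List (String × Int))) : Decidable (Pre_optimise_groups_py occ) := by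
  unfold Pre_optimise_groups_py; infer_instance

def pvWitness_optimise_groups_py : (List (List (String × Int))) :=
  [[("grp1", 3), ("c", 0)], [("grp1", 3)]]

def Spec_optimise_groups_py (occ : List (List (String × Int))) (out : List String) : Prop := out = optimise_groups_py_alt occ
instance (occ : List (List (String × Int))) (out : List String) : Decidable (Spec_optimise_groups_py occ out) := by unfold Spec_optimise_groups_py; infer_instance

-- ===== CLAIM (what is proved, stated in full; the proofs are below) =====
def Claim_equal_optimise_groups_py : Prop := ∀ (occ : List (List (String × Int))), Dom_optimise_groups_py occ → Pre_optimise_groups_py occ → Spec_optimise_groups_py occ (optimise_groups_py occ)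

-- ===== LEMMAS AND PROOFS =====

-- The dict-building step, written as a single insert (the two branches both insert at p.1).
theorem pvDescStep_eq_insert (d : PySem.Dict String (Int × Int)) (p : String × Int) :
    (if d.contains p.1 = false then d.insert p.1 (1, p.2)
     else d.insert p.1 ((d.getD p.1 (0, 0)).1 + 1, (d.getD p.1 (0, 0)).2))
  = d.insert p.1 (if d.contains p.1 = false then (1, p.2)
      else ((d.getD p.1 (0, 0)).1 + 1, (d.getD p.1 (0, 0)).2)) := by
  by_cases h : d.contains p.1 = false <;> simp [h]

theorem pvDescDict_eq_flatten (occ : List (List (String × Int))) :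
    pvDescDict occ
  = occ.flatten.foldl (fun d p => d.insert p.1 (if d.contains p.1 = false then (1, p.2)
      else ((d.getD p.1 (0, 0)).1 + 1, (d.getD p.1 (0, 0)).2))) PySem.Dict.empty := by
  unfold pvDescDict
  rw [List.foldl_flatten]
  congr 1
  funext d options
  exact PySem.List.foldl_congr_mem options _ _ d (fun acc p _ => pvDescStep_eq_insert acc p)

theorem pvDescDict_keys_nodup (occ : List (List (String × Int))) :
    (pvDescDict occ).keys.Nodup := by
  rw [pvDescDict_eq_flatten]
  exact PySem.Dict.nodup_keys_foldl_insert_key occ.flatten (fun p => p.1)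
    (fun d p => if d.contains p.1 = false then (1, p.2)
      else ((d.getD p.1 (0, 0)).1 + 1, (d.getD p.1 (0, 0)).2))
    PySem.Dict.empty PySem.Dict.nodup_keys_empty

theorem pvMem_keys_descDict (occ : List (List (String × Int))) (options : List (String × Int))
    (p : String × Int) (ho : options ∈ occ) (hp : p ∈ options) :
    p.1 ∈ (pvDescDict occ).keys := by
  rw [pvDescDict_eq_flatten,
      PySem.Dict.keys_foldl_insert_key occ.flatten (fun p => p.1)
        (fun d p => if d.contains p.1 = false then (1, p.2)
          else ((d.getD p.1 (0, 0)).1 + 1, (d.getD p.1 (0, 0)).2)) PySem.Dict.empty]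
  have hmem : p.1 ∈ occ.flatten.map (fun p => p.1) :=
    List.mem_map_of_mem (List.mem_flatten.mpr ⟨options, ho, hp⟩)
  simpa [PySem.Set.update, PySem.Dict.keys_empty, PySem.Set.ofList_eq_foldl] using
    (PySem.Set.mem_ofList (occ.flatten.map (fun p => p.1)) p.1).mpr hmem

-- insertBy commutes with map when the comparison agrees through the map.
theorem pvMap_insertBy {α β : Type} (before : α → α → Bool) (before' : β → β → Bool)
    (h : α → β) (x : α) (ys : List α)
    (hb : ∀ y ∈ ys, before' (h x) (h y) = before x y) :
    PySem.List.insertBy before' (h x) (ys.map h) = (PySem.List.insertBy before x ys).map h := by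
  induction ys with
  | nil => simp [PySem.List.insertBy]
  | cons y t ih =>
    have hy := hb y (by simp)
    by_cases hxy : before x y = true
    · simp [PySem.List.insertBy, hy, hxy]
    · simp only [List.map_cons, PySem.List.insertBy, hy, hxy, if_neg, Bool.not_eq_true]
      simp [ih (fun z hz => hb z (by simp [hz]))]

theorem pvFoldl_insertBy_map {α β : Type} (before : α → α → Bool) (before' : β → β → Bool)
    (h : α → β) :
    ∀ (l acc : List α), (∀ a ∈ l, ∀ b, b ∈ l ∨ b ∈ acc → before' (h a) (h b) = before a b) →
    (l.map h).foldl (fun as x => PySem.List.insertBy before' x as) (acc.map h)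
      = (l.foldl (fun as x => PySem.List.insertBy before x as) acc).map h := by
  intro l
  induction l with
  | nil => intro acc _; simp
  | cons a t ih =>
    intro acc hb
    simp only [List.map_cons, List.foldl_cons]
    rw [pvMap_insertBy before before' h a acc
      (fun y hy => hb a (by simp) y (Or.inr hy))]
    exact ih _ (fun x hx b hb' => hb x (by simp [hx]) b (by
      rcases hb' with h1 | h2
      · exact Or.inl (by simp [h1])
      · rcases (PySem.List.mem_insertBy _ _ _ _).mp h2 with rfl | h3
        · exact Or.inl (by simp)
        · exact Or.inr h3))

theorem pvSorted2_map {α β : Type} (h : α → β) (k1 k2 : α → Int) (K1 K2 : β → Int)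
    (l : List α) (h1 : ∀ a ∈ l, K1 (h a) = k1 a) (h2 : ∀ a ∈ l, K2 (h a) = k2 a) :
    PySem.List.sorted2 (l.map h) K1 K2 = (PySem.List.sorted2 l k1 k2).map h := by
  simp only [PySem.List.sorted2, Bool.false_eq_true, if_false]
  exact pvFoldl_insertBy_map
    (before := fun a b => decide (k1 a < k1 b) || (!decide (k1 b < k1 a) && decide (k2 a < k2 b)))
    (before' := fun a b => decide (K1 a < K1 b) || (!decide (K1 b < K1 a) && decide (K2 a < K2 b)))
    h l []
    (fun a ha b hb => by
      rcases hb with hb | hb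
      · simp only [h1 a ha, h2 a ha, h1 b hb, h2 b hb]
      · simp at hb)

-- first list element belonging to `names` = first-minimal element of `names` by position key
theorem pvFind_eq_min (R names : List String) (g : String → Int)
    (hg : ∀ (i : Nat) (hi : i < R.length), g R[i] = (i : Int))
    (hne : names ≠ []) (hsub : ∀ n ∈ names, n ∈ R) :
    R.find? (fun n => decide (n ∈ names)) = PySem.List.min? names g := by
  obtain ⟨m, hm⟩ : ∃ m, PySem.List.min? names g = some m := by
    cases h : PySem.List.min? names g with
    | none => exact absurd ((PySem.List.min?_eq_none_iff names g).mp h) hne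
    | some m => exact ⟨m, rfl⟩
  obtain ⟨f, hf⟩ : ∃ f, R.find? (fun n => decide (n ∈ names)) = some f := by
    cases h : R.find? (fun n => decide (n ∈ names)) with
    | none =>
      obtain ⟨n0, hn0⟩ := List.exists_mem_of_ne_nil names hne
      exact absurd (by simpa using List.find?_eq_none.mp h n0 (hsub n0 hn0)) (by simp [hn0])
    | some f => exact ⟨f, rfl⟩
  rw [hf, hm]
  rw [List.find?_eq_some_iff_getElem] at hf
  obtain ⟨hpf, i_f, hif, hRif, hbefore⟩ := hf
  have hfmem : f ∈ names := by simpa using hpf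
  have hbound : ∀ n ∈ names, (i_f : Int) ≤ g n := by
    intro n hn
    obtain ⟨j, hj, rfl⟩ := List.mem_iff_getElem.mp (hsub n hn)
    rw [hg j hj]
    by_contra hlt
    have hji : j < i_f := by omega
    have := hbefore j hji
    simp [hn] at this
  have hgf : g f = (i_f : Int) := by rw [← hRif]; exact hg i_f hif
  have h1 : g m ≤ g f := PySem.List.min?_isMin hm f hfmem
  have h2 : g f ≤ g m := hgf ▸ hbound m (PySem.List.min?_mem hm)
  obtain ⟨jm, hjm, hRjm⟩ := List.mem_iff_getElem.mp (hsub m (PySem.List.min?_mem hm))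
  have hgm : g m = (jm : Int) := by rw [← hRjm]; exact hg jm hjm
  have hij : i_f = jm := by
    have hle := le_antisymm h1 h2
    rw [hgf, hgm] at hle
    exact_mod_cast hle.symm
  subst hij
  rw [← hRif, hRjm]

-- the rank dictionary maps ranked[i] to i
theorem pvRank_getD (ranked : List String) (hnd : ranked.Nodup)
    (i : Nat) (hi : i < ranked.length) :
    ((PySem.List.enumerate ranked 0).foldl (fun d a => d.insert a.2 a.1)
      PySem.Dict.empty).getD ranked[i] 0 = (i : Int) := by
  set rank := (PySem.List.enumerate ranked 0).foldl (fun d a => d.insert a.2 a.1)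
      PySem.Dict.empty with hrank
  have hitems : rank.items = (PySem.List.enumerate ranked 0).map (fun a => (a.2, a.1)) := by
    have h := PySem.Dict.items_foldl_insert_fresh (l := PySem.List.enumerate ranked 0)
      (k := fun a : Int × String => a.2) (v := fun a : Int × String => a.1)
      (d := PySem.Dict.empty)
      (fun a _ => PySem.Dict.contains_empty _)
      (by rw [PySem.List.map_snd_enumerate]; exact hnd)
    rw [hrank, h]
    simp [PySem.Dict.empty]
  have hmem : (ranked[i], ((0 : Int) + (i : Int))) ∈ rank.items := by
    rw [hitems]
    exact List.mem_map_of_mem ((PySem.List.mem_enumerate_iff ranked 0 _).mpr ⟨i, hi, rfl⟩)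
  have hknd : rank.keys.Nodup := by
    rw [hrank]
    exact PySem.Dict.nodup_keys_foldl_insert_key (l := PySem.List.enumerate ranked 0)
      (key := fun a : Int × String => a.2) (f := fun d a => a.1) (d := PySem.Dict.empty)
      PySem.Dict.nodup_keys_empty
  have := PySem.Dict.getD_of_mem_items rank hmem hknd 0
  simpa using this

-- ===== VERDICT (by name: the statement is the Claim_ definition above) =====
theorem optimise_groups_py_spec : Claim_equal_optimise_groups_py := by
  intro occ _ hpre
  unfold Spec_optimise_groups_py
  simp only [optimise_groups_py, optimise_groups_py_alt]
  set D := pvDescDict occ with hD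
  have hnd : D.keys.Nodup := pvDescDict_keys_nodup occ
  set desclist := PySem.List.sorted2 (D.items.map (fun kv => (kv.1, kv.2.1, kv.2.2)))
      (fun x => -x.2.1) (fun x => x.2.2) with hdesclist
  set ranked := PySem.List.sorted2 D.keys
      (fun n => -(D.getD n (0, 0)).1) (fun n => (D.getD n (0, 0)).2) with hranked
  set rank : PySem.Dict String Int :=
    (PySem.List.enumerate ranked 0).foldl (fun d a => d.insert a.2 a.1) PySem.Dict.empty
    with hrank
  have hmapkeys : D.keys = (D.items.map (fun kv => (kv.1, kv.2.1, kv.2.2))).map Prod.fst := by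
    simp only [PySem.Dict.keys, List.map_map]
    rfl
  have hRdesc : ranked = desclist.map Prod.fst := by
    rw [hranked, hdesclist, hmapkeys]
    refine pvSorted2_map Prod.fst (fun x : String × Int × Int => -x.2.1)
      (fun x : String × Int × Int => x.2.2)
      (fun n => -(D.getD n (0, 0)).1) (fun n => (D.getD n (0, 0)).2) _ ?_ ?_ <;>
    · intro a ha
      simp only [List.mem_map] at ha
      obtain ⟨kv, hkv, rfl⟩ := ha
      have hget : D.getD kv.1 (0, 0) = kv.2 :=
        PySem.Dict.getD_of_mem_items D (by simpa using hkv) hnd (0, 0)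
      simp [hget]
  have hrankednd : ranked.Nodup :=
    ((PySem.List.sorted2_perm D.keys _ _ false).nodup_iff).mpr hnd
  have hg : ∀ (i : Nat) (hi : i < ranked.length), rank.getD ranked[i] 0 = (i : Int) :=
    fun i hi => pvRank_getD ranked hrankednd i hi
  -- the per-variable pick (the option name with minimal rank)
  set pick : List (String × Int) → String :=
    fun options => (PySem.List.min? (options.map (·.1)) (fun n => rank.getD n 0)).getD ""
    with hpickdef
  have hmin : ∀ o ∈ occ,
      PySem.List.min? (o.map (·.1)) (fun n => rank.getD n 0) = some (pick o) := by
    intro o ho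
    cases h : PySem.List.min? (o.map (·.1)) (fun n => rank.getD n 0) with
    | none =>
      have := (PySem.List.min?_eq_none_iff _ _).mp h
      exact absurd (List.map_eq_nil_iff.mp this) (hpre o ho)
    | some m => simp [hpickdef, h]
  have hfindmap : ∀ o ∈ occ,
      (desclist.find? (fun d => decide (d.1 ∈ o.map (·.1)))).map Prod.fst = some (pick o) := by
    intro o ho
    have hsub : ∀ n ∈ o.map (·.1), n ∈ ranked := by
      intro n hn
      obtain ⟨p, hp, rfl⟩ := List.mem_map.mp hn
      exact ((PySem.List.sorted2_perm D.keys _ _ false).mem_iff).mpr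
        (pvMem_keys_descDict occ o p ho hp)
    have hkey := pvFind_eq_min ranked (o.map (·.1)) (fun n => rank.getD n 0) hg
      (by intro h; exact (hpre o ho) (List.map_eq_nil_iff.mp h)) hsub
    calc (desclist.find? (fun d => decide (d.1 ∈ o.map (·.1)))).map Prod.fst
        = ranked.find? (fun n => decide (n ∈ o.map (·.1))) := by
          rw [hRdesc, List.find?_map]; rfl
      _ = some (pick o) := by rw [hkey]; exact hmin o ho
  -- A's result list is occ.map pick
  have hAres : (occ.foldl (fun res options =>
      match desclist.find? (fun d => decide (d.1 ∈ options.map (·.1))) with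
      | some d => res ++ [d.1]
      | none => res) ([] : List String)) = occ.map pick := by
    rw [PySem.List.foldl_congr_mem occ _ (fun res o => res ++ [pick o]) []
      (by
        intro acc o ho
        obtain ⟨d, hd, hd1⟩ := Option.map_eq_some_iff.mp (hfindmap o ho)
        rw [hd]
        simp [hd1])]
    simpa using PySem.List.foldl_append_singleton_eq_map pick occ []
  -- B's used set is Set.ofList (occ.map pick)
  have hBused : (occ.foldl (fun u options =>
      match PySem.List.min? (options.map (·.1)) (fun n => rank.getD n 0) with
      | some m => PySem.Set.add u m
      | none => u) PySem.Set.empty) = PySem.Set.ofList (occ.map pick) := by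
    rw [PySem.List.foldl_congr_mem occ _ (fun u o => PySem.Set.add u (pick o)) PySem.Set.empty
      (by intro acc o ho; rw [hmin o ho])]
    rw [PySem.Set.ofList_eq_foldl, List.foldl_map]
    rfl
  rw [hAres, hBused]
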